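-- pv_equiv track=rewrite | github.com/shaneholloman/gpt-pilot | core/utils/text.py | trim_logs
-- ===== SOURCE A (Python) =====
-- def trim_logs(logs: str) -> str:
--     """
--     Trim logs by removing everything after specific marker phrases.
--
--     This function cuts off the string at the first occurrence of
--     "Here are the backend logs" or "Here are the frontend logs".
--
--     :param logs: Log text to trim
--     :return: Trimmed log text with the marker phrase removed
--     """
--     if not logs:
--         return ""
--
--     # Define marker phrases
--     markers = ["Here are the backend logs", "Here are the frontend logs"]
--
--     # Find the first occurrence of any marker
--     index = float("inf")
--     for marker in markers:
--         pos = logs.find(marker)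
--         if pos != -1 and pos < index:
--             index = pos
--
--     # If a marker was found, trim the string
--     if index != float("inf"):
--         return logs[:index]
--
--     return logs
-- ===== SOURCE B (Python) =====
-- def trim_logs(logs: str) -> str:
--     markers = ("Here are the backend logs", "Here are the frontend logs")
--     for i in range(len(logs)):
--         if logs.startswith(markers, i):
--             return logs[:i]
--     return logs
-- ===== Notes on version B (the rewrite author's own statement) =====
-- stated objective: idiomatic
-- what changed: Replaces the two separate str.find passes plus running-minimum tracking with one left-to-right scan that returns logs[:i] at the first position i where either marker starts (logs.startswith(markers, i)), the empty-guard and no-match branch falling out of the loop itself.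
import Mathlib
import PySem

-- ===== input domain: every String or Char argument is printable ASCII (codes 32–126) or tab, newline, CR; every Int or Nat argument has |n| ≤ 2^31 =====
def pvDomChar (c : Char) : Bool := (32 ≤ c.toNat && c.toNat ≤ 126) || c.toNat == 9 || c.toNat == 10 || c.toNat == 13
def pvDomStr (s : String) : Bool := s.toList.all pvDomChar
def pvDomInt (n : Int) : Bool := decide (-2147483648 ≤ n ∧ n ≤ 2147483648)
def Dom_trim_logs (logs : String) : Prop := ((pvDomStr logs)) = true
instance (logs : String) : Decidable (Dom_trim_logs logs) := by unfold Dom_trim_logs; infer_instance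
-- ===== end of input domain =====

-- B changes the algorithm: one left-to-right scan for the first position where either marker
-- starts, instead of A's two str.find passes combined by a running minimum (objective: idiomatic).

-- ===== PORT A =====
def trim_logs (logs : String) : String :=
  if PySem.Str.len logs = 0 then "" else
  let markers : List String := ["Here are the backend logs", "Here are the frontend logs"]
  let index : Option Int := markers.foldl (fun index marker =>
      let pos := PySem.Str.find logs marker
      if pos != -1 && index.all (fun ix => pos < ix) then some pos else index) none
  match index with
  | some ix => PySem.Str.slice logs none (some ix)
  | none => logs

-- ===== PORT B =====
-- the `for i in range(len(logs)): if logs.startswith(markers, i)` loop of Source B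
def trimScan (m1 m2 : List Char) : List Char → Nat → Option Nat
  | [], _ => none
  | c :: t, i =>
      if m1.isPrefixOf (c :: t) || m2.isPrefixOf (c :: t) then some i
      else trimScan m1 m2 t (i + 1)

def trim_logs_alt (logs : String) : String :=
  match trimScan "Here are the backend logs".toList "Here are the frontend logs".toList
        logs.toList 0 with
  | some i => PySem.Str.slice logs none (some (i : Int))
  | none => logs

-- ===== PRECONDITION & SPEC =====
def Spec_trim_logs (logs : String) (out : String) : Prop := out = trim_logs_alt logs
instance (logs : String) (out : String) : Decidable (Spec_trim_logs logs out) := by unfold Spec_trim_logs; infer_instance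

-- ===== CLAIM (what is proved, stated in full; the proofs are below) =====
def Claim_equal_trim_logs : Prop := ∀ (logs : String), Dom_trim_logs logs → Spec_trim_logs logs (trim_logs logs)

-- ===== LEMMAS AND PROOFS =====

theorem trimScan_eq_none_iff (m1 m2 : List Char) (h1 : m1 ≠ []) (h2 : m2 ≠ [])
    (s : List Char) (i : Nat) :
    trimScan m1 m2 s i = none ↔ (∀ j, ¬ m1 <+: s.drop j) ∧ (∀ j, ¬ m2 <+: s.drop j) := by
  induction s generalizing i with
  | nil =>
    refine ⟨fun _ => ⟨fun j hp => ?_, fun j hp => ?_⟩, fun _ => rfl⟩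
    · exact h1 (List.prefix_nil.mp (by simpa using hp))
    · exact h2 (List.prefix_nil.mp (by simpa using hp))
  | cons c t ih =>
    by_cases hm : (m1.isPrefixOf (c :: t) || m2.isPrefixOf (c :: t)) = true
    · simp only [trimScan, hm, if_true]
      constructor
      · intro h; simp at h
      · rintro ⟨H1, H2⟩
        rcases Bool.or_eq_true_iff.mp hm with h | h
        · exact absurd (List.isPrefixOf_iff_prefix.mp h) (by simpa using H1 0)
        · exact absurd (List.isPrefixOf_iff_prefix.mp h) (by simpa using H2 0)
    · have hm1 : ¬ m1 <+: (c :: t) := fun hp =>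
        hm (by simp [List.isPrefixOf_iff_prefix.mpr hp])
      have hm2 : ¬ m2 <+: (c :: t) := fun hp =>
        hm (by simp [List.isPrefixOf_iff_prefix.mpr hp])
      simp only [trimScan, hm, if_false, Bool.false_eq_true]
      rw [ih (i + 1)]
      constructor
      · rintro ⟨H1, H2⟩
        refine ⟨fun j => ?_, fun j => ?_⟩
        · cases j with
          | zero => simpa using hm1
          | succ j => simpa using H1 j
        · cases j with
          | zero => simpa using hm2
          | succ j => simpa using H2 j
      · rintro ⟨H1, H2⟩
        exact ⟨fun j => by simpa using H1 (j + 1), fun j => by simpa using H2 (j + 1)⟩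

theorem trimScan_eq_some (m1 m2 : List Char) (s : List Char) (i k : Nat)
    (hk : k < s.length)
    (hmatch : m1 <+: s.drop k ∨ m2 <+: s.drop k)
    (hmin : ∀ j < k, ¬ m1 <+: s.drop j ∧ ¬ m2 <+: s.drop j) :
    trimScan m1 m2 s i = some (i + k) := by
  induction s generalizing i k with
  | nil => simp at hk
  | cons c t ih =>
    cases k with
    | zero =>
      have : (m1.isPrefixOf (c :: t) || m2.isPrefixOf (c :: t)) = true := by
        rcases hmatch with h | h <;>
          simp [List.isPrefixOf_iff_prefix.mpr (by simpa using h)]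
      simp [trimScan, this]
    | succ k =>
      have h0 := hmin 0 (Nat.succ_pos k)
      have : (m1.isPrefixOf (c :: t) || m2.isPrefixOf (c :: t)) = true → False := by
        intro h
        rcases Bool.or_eq_true_iff.mp h with h | h
        · exact h0.1 (by simpa using List.isPrefixOf_iff_prefix.mp h)
        · exact h0.2 (by simpa using List.isPrefixOf_iff_prefix.mp h)
      simp only [trimScan, Bool.or_eq_true]
      rw [if_neg (by intro h; exact this (by simpa using h))]
      have := ih (i + 1) k (by simpa using hk)
        (by simpa using hmatch)
        (fun j hj => by simpa using hmin (j + 1) (by omega))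
      rw [this]; congr 1; omega

-- no occurrence of m anywhere ⇔ find = -1
theorem no_prefix_of_find_neg (s m : List Char) (h : PySem.Chars.find s m = -1) :
    ∀ j, ¬ m <+: s.drop j := by
  intro j hj
  have : PySem.Chars.isIn m s = true :=
    (PySem.Chars.exists_prefix_drop_iff_isIn m s).mp ⟨j, hj⟩
  exact ((PySem.Chars.find_eq_neg_one_iff s m).mp h)
    ((PySem.Chars.isIn_iff_infix m s).mp this)

theorem find_lt_length (s m : List Char) (hm : m ≠ []) (h : 0 ≤ PySem.Chars.find s m) :
    (PySem.Chars.find s m).toNat < s.length := by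
  have hpre := (PySem.Chars.find_spec h).1
  by_contra hge
  have : s.drop (PySem.Chars.find s m).toNat = [] :=
    List.drop_eq_nil_of_le (by omega)
  rw [this, List.prefix_nil] at hpre
  exact hm hpre

theorem trim_logs_spec' : ∀ (logs : String), trim_logs logs = trim_logs_alt logs := by
  intro logs
  set m1 := "Here are the backend logs".toList with hm1def
  set m2 := "Here are the frontend logs".toList with hm2def
  have hm1ne : m1 ≠ [] := by simp [hm1def]
  have hm2ne : m2 ≠ [] := by simp [hm2def]
  set s := logs.toList with hsdef
  set f1 := PySem.Chars.find s m1 with hf1def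
  set f2 := PySem.Chars.find s m2 with hf2def
  have hf1lb := PySem.Chars.neg_one_le_find s m1
  have hf2lb := PySem.Chars.neg_one_le_find s m2
  by_cases hempty : PySem.Str.len logs = 0
  · -- logs = "": A returns "", B's scan finds nothing and returns logs = ""
    have hnil : logs.toList = [] := by
      have := PySem.Str.len_eq logs
      rw [hempty] at this
      exact List.length_eq_zero_iff.mp (by omega)
    have hlogs : logs = "" := String.toList_eq_nil_iff.mp hnil
    subst hlogs
    simp [trim_logs, trim_logs_alt, trimScan]
  · -- reduce A's two-marker foldl to the two finds
    have hA : trim_logs logs =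
        (match (if f1 != -1 && true then some f1 else none) |>.rec
            (motive := fun _ => Option Int)
            (if f2 != -1 then some f2 else none)
            (fun ix => if f2 != -1 && decide (f2 < ix) then some f2 else some ix) with
          | some ix => PySem.Str.slice logs none (some ix)
          | none => logs) := by
      simp only [trim_logs, if_neg hempty, List.foldl, PySem.Str.find_eq,
        ← hsdef, ← hm1def, ← hm2def, ← hf1def, ← hf2def]
      cases hc : (f1 != -1 && Option.all (fun ix => decide (f1 < ix)) none) <;>
        simp_all [Option.all]
    by_cases h1 : f1 = -1 <;> by_cases h2 : f2 = -1
    · -- neither marker occurs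
      have hnone : trimScan m1 m2 s 0 = none :=
        (trimScan_eq_none_iff m1 m2 hm1ne hm2ne s 0).mpr
          ⟨no_prefix_of_find_neg s m1 h1, no_prefix_of_find_neg s m2 h2⟩
      rw [hA]
      simp only [trim_logs_alt, ← hm1def, ← hm2def, ← hsdef, hnone, h1, h2]
      norm_num
    · -- only m2 occurs
      have h2n : (0:Int) ≤ f2 := by omega
      have hspec := PySem.Chars.find_spec (sub := m2) (s := s) h2n
      have hsome : trimScan m1 m2 s 0 = some (0 + f2.toNat) :=
        trimScan_eq_some m1 m2 s 0 f2.toNat (find_lt_length s m2 hm2ne h2n)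
          (Or.inr hspec.1)
          (fun j hj => ⟨no_prefix_of_find_neg s m1 h1 j, hspec.2 j hj⟩)
      rw [hA]
      simp only [trim_logs_alt, ← hm1def, ← hm2def, ← hsdef, hsome, h1]
      have : f2 != -1 := by simp [h2]
      simp only [this, Bool.false_and, bne_self_eq_false]
      norm_num
      rw [max_eq_left h2n]
    · -- only m1 occurs
      have h1n : (0:Int) ≤ f1 := by omega
      have hspec := PySem.Chars.find_spec (sub := m1) (s := s) h1n
      have hsome : trimScan m1 m2 s 0 = some (0 + f1.toNat) :=
        trimScan_eq_some m1 m2 s 0 f1.toNat (find_lt_length s m1 hm1ne h1n)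
          (Or.inl hspec.1)
          (fun j hj => ⟨hspec.2 j hj, no_prefix_of_find_neg s m2 h2 j⟩)
      rw [hA]
      simp only [trim_logs_alt, ← hm1def, ← hm2def, ← hsdef, hsome]
      have e1 : (f1 != -1) = true := by simp [h1]
      have e2 : (f2 != -1) = false := by simp [h2]
      simp only [e1, e2, Bool.true_and, Bool.false_and, if_true]
      norm_num
      rw [max_eq_left h1n]
    · -- both occur: A takes the minimum, B stops at the first match overall
      have h1n : (0:Int) ≤ f1 := by omega
      have h2n : (0:Int) ≤ f2 := by omega
      have hspec1 := PySem.Chars.find_spec (sub := m1) (s := s) h1n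
      have hspec2 := PySem.Chars.find_spec (sub := m2) (s := s) h2n
      have e1 : (f1 != -1) = true := by simp [h1]
      have e2 : (f2 != -1) = true := by simp [h2]
      by_cases hlt : f2 < f1
      · have hsome : trimScan m1 m2 s 0 = some (0 + f2.toNat) :=
          trimScan_eq_some m1 m2 s 0 f2.toNat (find_lt_length s m2 hm2ne h2n)
            (Or.inr hspec2.1)
            (fun j hj => ⟨hspec1.2 j (by omega), hspec2.2 j hj⟩)
        rw [hA]
        simp only [trim_logs_alt, ← hm1def, ← hm2def, ← hsdef, hsome, e1, e2,
          Bool.true_and, if_true, decide_eq_true_eq]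
        rw [if_pos hlt]
        norm_num
        rw [max_eq_left h2n]
      · have hsome : trimScan m1 m2 s 0 = some (0 + f1.toNat) :=
          trimScan_eq_some m1 m2 s 0 f1.toNat (find_lt_length s m1 hm1ne h1n)
            (Or.inl hspec1.1)
            (fun j hj => ⟨hspec1.2 j hj, hspec2.2 j (by omega)⟩)
        rw [hA]
        simp only [trim_logs_alt, ← hm1def, ← hm2def, ← hsdef, hsome, e1, e2,
          Bool.true_and, if_true, decide_eq_true_eq]
        rw [if_neg hlt]
        norm_num
        rw [max_eq_left h1n]

-- ===== VERDICT (by name: the statement is the Claim_ definition above) =====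
theorem trim_logs_spec : Claim_equal_trim_logs := by
  intro logs _
  exact trim_logs_spec' logs
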